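-- pv_equiv track=rewrite | github.com/apk0201/MyPractice | Kprefix.py | solve
-- ===== SOURCE A (Python) =====
-- def solve(nums, k):
--     a = 0
--     index = 0
--     n = len(nums)
--     if n != 0:
--         for i in range(n):
--             if a <= k:
--                 a = a + nums[i]
--                 index = i
--             if a > k:
--                 return i - 1
--                 break
--         return index
--     else:
--         return -1
-- ===== SOURCE B (Python) =====
-- def _fit(nums, k):
--     # Divide and conquer: length of the longest prefix whose elements can be
--     # paid for greedily out of budget k (each element consumes its value).
--     n = len(nums)
--     if n == 0:
--         return 0
--     if n == 1:
--         return 1 if nums[0] <= k else 0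
--     mid = n // 2
--     left = nums[:mid]
--     cl = _fit(left, k)
--     if cl < mid:
--         return cl
--     return mid + _fit(nums[mid:], k - sum(left))
--
--
-- def solve(nums, k):
--     # If k < 0 the empty prefix (sum 0) already exceeds k: nothing fits.
--     if k < 0:
--         return -1
--     return _fit(nums, k) - 1
-- ===== Notes on version B (the rewrite author's own statement) =====
-- stated objective: alternative
-- what changed: Replaces A's fused index-tracking scan by a divide-and-conquer that computes the length of the longest greedily-affordable prefix on two halves (recursing on the right half with the budget reduced by the left half's sum) and returns that count minus 1, with a k<0 guard for the empty prefix.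
import Mathlib
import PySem

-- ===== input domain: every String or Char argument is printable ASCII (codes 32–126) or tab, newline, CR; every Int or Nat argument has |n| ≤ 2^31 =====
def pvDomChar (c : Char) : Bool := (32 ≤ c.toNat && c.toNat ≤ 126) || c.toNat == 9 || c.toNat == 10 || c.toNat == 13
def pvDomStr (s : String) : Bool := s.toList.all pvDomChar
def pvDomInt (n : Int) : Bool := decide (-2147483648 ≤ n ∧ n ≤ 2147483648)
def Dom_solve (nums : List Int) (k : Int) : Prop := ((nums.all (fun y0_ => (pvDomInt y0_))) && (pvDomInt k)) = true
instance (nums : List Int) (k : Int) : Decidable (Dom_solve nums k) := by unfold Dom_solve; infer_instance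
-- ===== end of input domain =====

-- B replaces A's fused index-tracking scan by a divide-and-conquer computing the length of the
-- longest affordable prefix (right half gets the budget minus the left half's sum), answer = count - 1
-- (objective: alternative; same values everywhere).

-- ===== PORT A =====
-- the for-loop of A: remaining elements, current index i, accumulator a, last taken index
def solveGo (k : Int) : List Int → Int → Int → Int → Int
  | [], _, _, index => index
  | x :: xs, i, a, index =>
    let a' := if a ≤ k then a + x else a
    let index' := if a ≤ k then i else index
    if a' > k then i - 1 else solveGo k xs (i + 1) a' index'

def solve (nums : List Int) (k : Int) : Int :=
  if nums.length ≠ 0 then solveGo k nums 0 0 0 else -1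

-- ===== PORT B =====
-- _fit: divide-and-conquer length of the longest prefix affordable out of budget k
-- (fuel = the list's length at the top call; purely a totality device, never exhausted)
def fitB : Nat → List Int → Int → Nat
  | _, [], _ => 0
  | _, [x], k => if x ≤ k then 1 else 0
  | 0, _ :: _ :: _, _ => 0
  | fuel + 1, x :: y :: rest, k =>
    let n := (x :: y :: rest).length
    let mid := n / 2
    let left := (x :: y :: rest).take mid
    let cl := fitB fuel left k
    if cl < mid then cl else mid + fitB fuel ((x :: y :: rest).drop mid) (k - left.sum)

def solve_alt (nums : List Int) (k : Int) : Int :=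
  if k < 0 then -1 else (fitB nums.length nums k : Int) - 1

-- ===== PRECONDITION & SPEC =====
def Spec_solve (nums : List Int) (k : Int) (out : Int) : Prop := out = solve_alt nums k
instance (nums : List Int) (k : Int) (out : Int) : Decidable (Spec_solve nums k out) := by unfold Spec_solve; infer_instance

-- ===== CLAIM =====
def Claim_equal_solve : Prop := ∀ (nums : List Int) (k : Int), Dom_solve nums k → Spec_solve nums k (solve nums k)

-- ===== LEMMAS AND PROOFS =====

-- sequential specification of the affordable-prefix count
def gcount : List Int → Int → Nat
  | [], _ => 0
  | x :: xs, k => if x ≤ k then 1 + gcount xs (k - x) else 0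

theorem gcount_append (L R : List Int) : ∀ k : Int,
    gcount (L ++ R) k =
      if gcount L k < L.length then gcount L k else L.length + gcount R (k - L.sum) := by
  induction L with
  | nil => intro k; simp [gcount]
  | cons x L ih =>
    intro k
    by_cases hx : x ≤ k
    · simp only [List.cons_append, gcount, if_pos hx, ih (k - x), List.length_cons,
        List.sum_cons]
      have e : k - x - L.sum = k - (x + L.sum) := by ring
      rw [e]
      split_ifs <;> omega
    · simp [gcount, if_neg hx]

theorem fitB_eq : ∀ (f : ℕ) (l : List Int), l.length ≤ f + 1 → ∀ k, fitB f l k = gcount l k := by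
  intro f
  induction f with
  | zero =>
    intro l hl k
    match l with
    | [] => simp [fitB, gcount]
    | [x] => simp [fitB, gcount]
    | x :: y :: rest => simp [List.length_cons] at hl
  | succ f ih =>
    intro l hl k
    match l with
    | [] => simp [fitB, gcount]
    | [x] => simp [fitB, gcount]
    | x :: y :: rest =>
      rw [fitB]
      set l := x :: y :: rest with hldef
      set mid := l.length / 2 with hmid
      have hlen : l.length = rest.length + 2 := by simp [hldef, List.length_cons]
      have hm1 : 1 ≤ mid := by omega
      have hm2 : mid < l.length := by omega
      have htake : (l.take mid).length = mid := by rw [List.length_take]; omega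
      have hdrop : (l.drop mid).length = l.length - mid := List.length_drop
      have h1 : fitB f (l.take mid) k = gcount (l.take mid) k := by
        exact ih (l.take mid) (by omega) k
      have h2 : fitB f (l.drop mid) (k - (l.take mid).sum)
          = gcount (l.drop mid) (k - (l.take mid).sum) := by
        exact ih (l.drop mid) (by omega) _
      rw [h1, h2]
      have := gcount_append (l.take mid) (l.drop mid) k
      rw [List.take_append_drop] at this
      rw [this, htake]

-- loop invariant for A: with a ≤ k and index = i - 1, the loop returns i + gcount xs (k - a) - 1
theorem solveGo_eq (k : Int) (xs : List Int) :
    ∀ i a : Int, a ≤ k → solveGo k xs i a (i - 1) = i + (gcount xs (k - a) : Int) - 1 := by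
  induction xs with
  | nil => intro i a _; simp [solveGo, gcount]
  | cons x xs ih =>
    intro i a ha
    simp only [solveGo, if_pos ha]
    by_cases h : a + x > k
    · have hx : ¬ x ≤ k - a := by omega
      simp [h, gcount, hx]
    · have hx : x ≤ k - a := by omega
      simp only [if_neg h, gcount, if_pos hx]
      have key := ih (i + 1) (a + x) (by omega)
      have e : (i : Int) + 1 - 1 = i := by ring
      rw [e] at key
      rw [key]
      have e2 : k - (a + x) = k - a - x := by ring
      rw [e2]
      push_cast
      ring

theorem solve_eq (nums : List Int) (k : Int) : solve nums k = solve_alt nums k := by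
  cases nums with
  | nil =>
    simp only [solve, solve_alt, List.length_nil]
    split_ifs <;> simp_all [fitB]
  | cons x xs =>
    by_cases hk : k < 0
    · -- a = 0 > k immediately: A returns -1; B's guard returns -1
      simp [solve, solve_alt, solveGo, hk, if_neg (by omega : ¬ (0:Int) ≤ k)]
    · have hk' : (0:Int) ≤ k := by omega
      rw [solve, solve_alt, if_pos (by simp), if_neg (by omega : ¬ k < 0),
          fitB_eq (x :: xs).length (x :: xs) (by omega) k]
      simp only [solveGo, if_pos hk', zero_add]
      by_cases h : x > k
      · have hx : ¬ x ≤ k := by omega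
        simp [h, gcount, hx]
      · have hx : x ≤ k := by omega
        simp only [if_neg h, gcount, if_pos hx]
        have key := solveGo_eq k xs 1 x (by omega)
        have e : (1 : Int) - 1 = 0 := by ring
        rw [e] at key
        rw [key]
        have e2 : k - x - 0 = k - x := by ring
        push_cast
        ring

-- ===== VERDICT =====
theorem solve_spec : Claim_equal_solve := by
  intro nums k _
  unfold Spec_solve
  exact solve_eq nums k
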